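-- pv_equiv track=rewrite | github.com/lanzarote0tr/manim_math | src/solver.py | _split_input_parts
-- ===== SOURCE A (Python) =====
-- from typing import List, Optional, Tuple
--
-- def _split_input_parts(input_str: str) -> List[str]:
--     parts: List[str] = []
--     for line in input_str.splitlines():
--         for chunk in line.split(";"):
--             chunk = chunk.strip()
--             if chunk:
--                 parts.append(chunk)
--     return parts
-- ===== SOURCE B (Python) =====
-- from typing import List
--
--
-- def _split_input_parts(input_str: str) -> List[str]:
--     # Single character-level scan: cut at newlines, carriage returns and
--     # semicolons, strip each piece, keep the non-empty ones.
--     parts: List[str] = []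
--     cur: List[str] = []
--     for ch in input_str:
--         if ch in "\n\r;":
--             piece = "".join(cur).strip()
--             if piece:
--                 parts.append(piece)
--             cur = []
--         else:
--             cur.append(ch)
--     piece = "".join(cur).strip()
--     if piece:
--         parts.append(piece)
--     return parts
-- ===== Notes on version B (the rewrite author's own statement) =====
-- stated objective: alternative
-- what changed: Replaced the nested loop over splitlines() and a per-line semicolon split by a single character-level scan with one pending-chunk accumulator that cuts directly at line breaks and semicolons.
import Mathlib
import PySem

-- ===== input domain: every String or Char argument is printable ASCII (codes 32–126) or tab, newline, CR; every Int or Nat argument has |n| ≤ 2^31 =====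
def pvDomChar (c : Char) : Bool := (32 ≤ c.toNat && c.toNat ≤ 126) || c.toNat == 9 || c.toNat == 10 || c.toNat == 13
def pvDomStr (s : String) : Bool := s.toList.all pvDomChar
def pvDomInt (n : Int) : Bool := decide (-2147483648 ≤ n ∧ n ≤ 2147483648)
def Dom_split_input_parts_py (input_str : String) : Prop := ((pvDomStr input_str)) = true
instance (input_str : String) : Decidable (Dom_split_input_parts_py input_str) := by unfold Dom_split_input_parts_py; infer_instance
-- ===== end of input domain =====

-- B replaces A's nested splitlines()/split(';') loops by one character-level scan
-- cutting at '\n', '\r' and ';' (objective: alternative, same asymptotic cost).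

-- ===== PORT A =====
-- line.split(";") has a non-empty separator, so Python never raises: split? is always some.
def split_input_parts_py (input_str : String) : List String :=
  (PySem.Str.splitlines input_str).foldl (fun parts line =>
    ((PySem.Str.split? line ";").getD []).foldl (fun parts chunk =>
      let c := PySem.Str.strip chunk
      if c ≠ "" then parts ++ [c] else parts) parts) []

-- ===== PORT B =====
-- helper: the scan loop of Source B (cur = pending chunk, parts = output so far)
def spAltGo : List Char → List Char → List String → List String
  | [], cur, parts =>
      let p := PySem.Chars.strip cur
      if p ≠ [] then parts ++ [String.ofList p] else parts
  | c :: t, cur, parts =>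
      if c = '\n' ∨ c = '\r' ∨ c = ';' then
        let p := PySem.Chars.strip cur
        spAltGo t [] (if p ≠ [] then parts ++ [String.ofList p] else parts)
      else
        spAltGo t (cur ++ [c]) parts

def split_input_parts_py_alt (input_str : String) : List String :=
  spAltGo input_str.toList [] []

-- ===== PRECONDITION & SPEC =====
def Spec_split_input_parts_py (input_str : String) (out : List String) : Prop := out = split_input_parts_py_alt input_str
instance (input_str : String) (out : List String) : Decidable (Spec_split_input_parts_py input_str out) := by unfold Spec_split_input_parts_py; infer_instance

-- ===== CLAIM (what is proved, stated in full; the proofs are below) =====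
def Claim_equal_split_input_parts_py : Prop := ∀ (input_str : String), Dom_split_input_parts_py input_str → Spec_split_input_parts_py input_str (split_input_parts_py input_str)

-- ===== LEMMAS AND PROOFS =====

-- strip a piece; keep it (as a String) only if non-empty
def pvF (cs : List Char) : Option String :=
  let p := PySem.Chars.strip cs
  if p = [] then none else some (String.ofList p)

-- prepend a prefix onto the first piece
def pvHcons (p : List Char) : List (List Char) → List (List Char)
  | [] => [p]
  | h :: r => (p ++ h) :: r

-- cut a char list at every separator char
def pvCutBy (sep : Char → Bool) : List Char → List (List Char)
  | [] => [[]]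
  | c :: t => if sep c then [] :: pvCutBy sep t else pvHcons [c] (pvCutBy sep t)

def pvSepA (c : Char) : Bool := c == ';'
def pvSepB (c : Char) : Bool := c == '\n' || c == '\r' || c == ';'

-- glue two piece lists at the seam (last piece of the first joins the first piece of the second)
def pvSeam : List (List Char) → List (List Char) → List (List Char)
  | [], l => l
  | [p], l => pvHcons p l
  | p :: ps, l => p :: pvSeam ps l

def pvIsNL (c : Char) : Bool := c == '\n' || c == '\r'

-- Python splitlines restricted to '\n' / '\r' / '\r\n' breaks (enough on Dom)
def pvLines : List Char → List Char → List (List Char)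
  | cur, [] => if cur.isEmpty then [] else [cur.reverse]
  | cur, '\r' :: '\n' :: t => cur.reverse :: pvLines [] t
  | cur, c :: t => if pvIsNL c then cur.reverse :: pvLines [] t else pvLines (c :: cur) t

theorem pvHcons_hcons (a b : List Char) (l : List (List Char)) :
    pvHcons a (pvHcons b l) = pvHcons (a ++ b) l := by
  cases l <;> simp [pvHcons]

theorem pvCutBy_ne_nil (sep : Char → Bool) (cs : List Char) : pvCutBy sep cs ≠ [] := by
  cases cs with
  | nil => simp [pvCutBy]
  | cons c t =>
    simp only [pvCutBy]
    split
    · simp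
    · cases pvCutBy sep t <;> simp [pvHcons]

theorem pvHcons_nil {l : List (List Char)} (h : l ≠ []) : pvHcons [] l = l := by
  cases l <;> simp_all [pvHcons]

theorem pvSeam_cons {ps : List (List Char)} (p : List Char) (l : List (List Char)) (h : ps ≠ []) :
    pvSeam (p :: ps) l = p :: pvSeam ps l := by
  cases ps <;> simp_all [pvSeam]

theorem pvSeam_singleton (p : List Char) (l : List (List Char)) :
    pvSeam [p] l = pvHcons p l := rfl

theorem pvSeam_ne_nil {x y : List (List Char)} (hx : x ≠ []) (hy : y ≠ []) :
    pvSeam x y ≠ [] := by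
  cases x with
  | nil => simp_all
  | cons p ps =>
    cases ps with
    | nil => cases y <;> simp_all [pvSeam, pvHcons]
    | cons q qs => rw [pvSeam_cons p _ (by simp)]; simp

theorem pvSeam_hcons {x : List (List Char)} (a : List Char) (z : List (List Char)) (hx : x ≠ []) :
    pvSeam (pvHcons a x) z = pvHcons a (pvSeam x z) := by
  cases x with
  | nil => simp_all
  | cons h r =>
    cases r with
    | nil =>
      rw [show pvHcons a [h] = [a ++ h] from rfl, pvSeam_singleton, pvSeam_singleton,
        pvHcons_hcons]
    | cons q qs =>
      rw [show pvHcons a (h :: q :: qs) = (a ++ h) :: q :: qs from rfl,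
        pvSeam_cons (ps := q :: qs) (a ++ h) z (by simp),
        pvSeam_cons (ps := q :: qs) h z (by simp)]
      rfl

theorem pvSeam_assoc {x y : List (List Char)} (z : List (List Char))
    (hx : x ≠ []) (hy : y ≠ []) :
    pvSeam (pvSeam x y) z = pvSeam x (pvSeam y z) := by
  induction x with
  | nil => simp_all
  | cons p ps ih =>
    cases ps with
    | nil => rw [pvSeam_singleton, pvSeam_singleton, pvSeam_hcons p z hy]
    | cons q qs =>
      rw [pvSeam_cons (ps := q :: qs) p y (by simp),
        pvSeam_cons (ps := pvSeam (q :: qs) y) p z (pvSeam_ne_nil (by simp) hy),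
        ih (by simp),
        pvSeam_cons (ps := q :: qs) p (pvSeam y z) (by simp)]

theorem pvSeam_cons_nil {x : List (List Char)} (l : List (List Char)) (hx : x ≠ []) :
    pvSeam x ([] :: l) = x ++ l := by
  induction x with
  | nil => simp_all
  | cons p ps ih =>
    cases ps with
    | nil => simp [pvSeam_singleton, pvHcons]
    | cons q qs => rw [pvSeam_cons p _ (by simp), ih (by simp)]; simp

theorem pvSeam_nilpiece {x : List (List Char)} (hx : x ≠ []) : pvSeam x [[]] = x := by
  induction x with
  | nil => simp_all
  | cons p ps ih =>
    cases ps with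
    | nil => simp [pvSeam_singleton, pvHcons]
    | cons q qs => rw [pvSeam_cons p _ (by simp), ih (by simp)]

theorem pvCutBy_append (sep : Char → Bool) (p q : List Char) :
    pvCutBy sep (p ++ q) = pvSeam (pvCutBy sep p) (pvCutBy sep q) := by
  induction p with
  | nil => simp [pvCutBy, pvSeam_singleton, pvHcons_nil (pvCutBy_ne_nil sep q)]
  | cons c p' ih =>
    simp only [List.cons_append, pvCutBy]
    split
    · rw [ih, pvSeam_cons _ _ (pvCutBy_ne_nil sep p')]
    · rw [ih, pvSeam_hcons _ _ (pvCutBy_ne_nil sep p')]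

theorem pvF_nil : pvF [] = none := by decide

theorem filterMap_pvF_cons_nil (l : List (List Char)) :
    ([] :: l).filterMap pvF = l.filterMap pvF := by
  simp [pvF_nil]

-- ---- splitOn [';'] computes pvCutBy pvSepA ----
theorem splitOn_go_spec : ∀ (fuel : Nat) (l cur : List Char) (acc : List (List Char)),
    l.length < fuel →
    PySem.Chars.splitOn.go [';'] fuel l cur acc
      = acc.reverse ++ pvHcons cur.reverse (pvCutBy pvSepA l) := by
  intro fuel
  induction fuel with
  | zero => intro l cur acc h; omega
  | succ n ih =>
    intro l cur acc h
    cases l with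
    | nil => simp [PySem.Chars.splitOn.go, pvCutBy, pvHcons]
    | cons c rest =>
      rw [PySem.Chars.splitOn.go]
      by_cases hc : c = ';'
      · subst hc
        simp only [List.isPrefixOf, beq_self_eq_true, Bool.true_and, if_pos]
        rw [ih _ _ _ (by simp at h ⊢; omega)]
        rw [show pvCutBy pvSepA (';' :: rest) = [] :: pvCutBy pvSepA rest from by
          simp [pvCutBy, pvSepA]]
        rw [show pvHcons cur.reverse ([] :: pvCutBy pvSepA rest)
            = cur.reverse :: pvCutBy pvSepA rest from by simp [pvHcons]]
        simp [pvHcons_nil (pvCutBy_ne_nil pvSepA rest)]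
      · have hp : [';'].isPrefixOf (c :: rest) = false := by
          simp [List.isPrefixOf]; exact fun h' => (hc h'.symm).elim
        rw [hp]
        simp only [Bool.false_eq_true, if_false]
        rw [ih _ _ _ (by simp at h ⊢; omega)]
        have : pvSepA c = false := by simp [pvSepA]; exact fun h' => (hc h').elim
        simp [pvCutBy, this, pvHcons_hcons]

theorem splitOn_eq_cutBy (l : List Char) :
    PySem.Chars.splitOn l [';'] = pvCutBy pvSepA l := by
  rw [PySem.Chars.splitOn, splitOn_go_spec _ _ _ _ (by omega)]
  simp [pvHcons_nil (pvCutBy_ne_nil pvSepA l)]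

-- ---- splitlines on Dom computes pvLines ----
theorem isB_eq_pvIsNL (c : Char) (h : pvDomChar c = true) :
    (decide (c.toNat = 10) || decide (c.toNat = 13) || decide (c.toNat = 11) ||
     decide (c.toNat = 12) || decide (c.toNat = 28) || decide (c.toNat = 29) ||
     decide (c.toNat = 30) || decide (c.toNat = 133) || decide (c.toNat = 8232) ||
     decide (c.toNat = 8233)) = pvIsNL c := by
  have h10 : (c == '\n') = decide (c.toNat = 10) := by
    by_cases hc : c = '\n'
    · subst hc; decide
    · have : c.toNat ≠ 10 := by
        intro hn
        exact hc (Char.ext (by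
          have : c.val.toNat = 10 := hn
          have h2 : ('\n').val.toNat = 10 := by decide
          exact UInt32.toNat_inj.mp (by omega)))
      simp [hc, this]
  have h13 : (c == '\r') = decide (c.toNat = 13) := by
    by_cases hc : c = '\r'
    · subst hc; decide
    · have : c.toNat ≠ 13 := by
        intro hn
        exact hc (Char.ext (by
          have : c.val.toNat = 13 := hn
          have h2 : ('\r').val.toNat = 13 := by decide
          exact UInt32.toNat_inj.mp (by omega)))
      simp [hc, this]
  simp only [pvDomChar, Bool.or_eq_true, Bool.and_eq_true, decide_eq_true_eq, beq_iff_eq] at h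
  have : c.toNat ≠ 11 ∧ c.toNat ≠ 12 ∧ c.toNat ≠ 28 ∧ c.toNat ≠ 29 ∧ c.toNat ≠ 30 ∧
      c.toNat ≠ 133 ∧ c.toNat ≠ 8232 ∧ c.toNat ≠ 8233 := by omega
  simp [pvIsNL, h10, h13, this.1, this.2.1, this.2.2.1, this.2.2.2.1, this.2.2.2.2.1,
    this.2.2.2.2.2.1, this.2.2.2.2.2.2.1, this.2.2.2.2.2.2.2]

theorem splitlines_go_spec (isB : Char → Bool) :
    ∀ (n : Nat) (cs : List Char), cs.length ≤ n → ∀ (cur : List Char) (acc : List (List Char)),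
    (∀ c ∈ cs, isB c = pvIsNL c) →
    PySem.Chars.splitlines.go isB cs cur acc = acc.reverse ++ pvLines cur cs := by
  intro n
  induction n with
  | zero =>
    intro cs hlen cur acc _
    have : cs = [] := by cases cs <;> simp_all
    subst this
    simp [PySem.Chars.splitlines.go, pvLines]
    split <;> simp_all
  | succ n ih =>
    intro cs hlen cur acc hB
    cases cs with
    | nil =>
      simp [PySem.Chars.splitlines.go, pvLines]
      split <;> simp_all
    | cons c rest =>
      by_cases hrn : c = '\r' ∧ ∃ t, rest = '\n' :: t
      · obtain ⟨hc, t, ht⟩ := hrn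
        subst hc ht
        rw [show PySem.Chars.splitlines.go isB ('\r' :: '\n' :: t) cur acc
            = PySem.Chars.splitlines.go isB t [] (cur.reverse :: acc) from by
          simp [PySem.Chars.splitlines.go]]
        rw [ih t (by simp at hlen ⊢; omega) [] _ (fun c hc => hB c (by simp [hc]))]
        simp [pvLines]
      · have heq : PySem.Chars.splitlines.go isB (c :: rest) cur acc
            = if isB c then PySem.Chars.splitlines.go isB rest [] (cur.reverse :: acc)
              else PySem.Chars.splitlines.go isB rest (c :: cur) acc := by
          apply PySem.Chars.splitlines.go.eq_3
          intro t hc ht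
          exact hrn ⟨hc, t, ht⟩
        have hlines : pvLines cur (c :: rest)
            = if pvIsNL c then cur.reverse :: pvLines [] rest else pvLines (c :: cur) rest := by
          apply pvLines.eq_3
          intro t hc ht
          exact hrn ⟨hc, t, ht⟩
        rw [heq, hlines, hB c (by simp)]
        by_cases hnl : pvIsNL c = true
        · rw [hnl]
          simp only [if_pos]
          rw [ih rest (by simp at hlen ⊢; omega) [] _ (fun c hc => hB c (by simp [hc]))]
          simp
        · rw [Bool.not_eq_true] at hnl
          rw [hnl]
          simp only [Bool.false_eq_true, if_false]
          exact ih rest (by simp at hlen ⊢; omega) (c :: cur) acc (fun c hc => hB c (by simp [hc]))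

theorem splitlines_eq_pvLines (cs : List Char) (h : ∀ c ∈ cs, pvDomChar c = true) :
    PySem.Chars.splitlines cs = pvLines [] cs := by
  rw [PySem.Chars.splitlines]
  exact splitlines_go_spec _ cs.length cs le_rfl [] []
    (fun c hc => isB_eq_pvIsNL c (h c hc))

-- ---- the central combinatorial fact: line-splitting then ';'-cutting,
--      and direct cutting at '\n'/'\r'/';', give the same non-empty stripped pieces ----
theorem pvKey : ∀ (n : Nat) (t : List Char), t.length ≤ n → ∀ (cur : List Char),
    ((pvLines cur t).flatMap (pvCutBy pvSepA)).filterMap pvF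
      = (pvSeam (pvCutBy pvSepA cur.reverse) (pvCutBy pvSepB t)).filterMap pvF := by
  intro n
  induction n with
  | zero =>
    intro t hlen cur
    have : t = [] := by cases t <;> simp_all
    subst this
    simp only [pvLines]
    by_cases hcur : cur.isEmpty
    · have : cur = [] := by cases cur <;> simp_all
      subst this
      simp [pvCutBy, pvSeam_singleton, pvHcons, pvF_nil]
    · rw [if_neg (by simp_all)]
      rw [show pvCutBy pvSepB [] = [[]] from rfl,
        pvSeam_nilpiece (pvCutBy_ne_nil pvSepA cur.reverse)]
      simp
  | succ n ih =>
    intro t hlen cur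
    cases t with
    | nil => exact ih [] (by simp) cur
    | cons c rest =>
      by_cases hrn : c = '\r' ∧ ∃ t', rest = '\n' :: t'
      · obtain ⟨hc, t', ht⟩ := hrn
        subst hc ht
        rw [show pvLines cur ('\r' :: '\n' :: t') = cur.reverse :: pvLines [] t' from rfl]
        rw [show pvCutBy pvSepB ('\r' :: '\n' :: t') = [] :: [] :: pvCutBy pvSepB t' from by
          simp [pvCutBy, pvSepB]]
        rw [pvSeam_cons_nil _ (pvCutBy_ne_nil pvSepA cur.reverse)]
        simp only [List.flatMap_cons, List.filterMap_append]
        rw [ih t' (by simp at hlen ⊢; omega) []]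
        rw [show (([] : List Char)).reverse = [] from rfl,
          show pvCutBy pvSepA [] = [[]] from rfl, pvSeam_singleton,
          pvHcons_nil (pvCutBy_ne_nil pvSepB t')]
        rw [filterMap_pvF_cons_nil]
      · have hlines : pvLines cur (c :: rest)
            = if pvIsNL c then cur.reverse :: pvLines [] rest else pvLines (c :: cur) rest := by
          apply pvLines.eq_3
          intro t hc ht
          exact hrn ⟨hc, t, ht⟩
        rw [hlines]
        by_cases hnl : pvIsNL c = true
        · rw [hnl]
          simp only [if_pos]
          have hsep : pvSepB c = true := by
            simp [pvIsNL] at hnl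
            rcases hnl with h | h <;> simp [pvSepB, h]
          rw [show pvCutBy pvSepB (c :: rest) = [] :: pvCutBy pvSepB rest from by
            simp [pvCutBy, hsep]]
          rw [pvSeam_cons_nil _ (pvCutBy_ne_nil pvSepA cur.reverse)]
          simp only [List.flatMap_cons, List.filterMap_append]
          rw [ih rest (by simp at hlen ⊢; omega) []]
          rw [show (([] : List Char)).reverse = [] from rfl,
            show pvCutBy pvSepA [] = [[]] from rfl, pvSeam_singleton,
            pvHcons_nil (pvCutBy_ne_nil pvSepB rest)]
        · rw [Bool.not_eq_true] at hnl
          rw [hnl]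
          simp only [Bool.false_eq_true, if_false]
          rw [ih rest (by simp at hlen ⊢; omega) (c :: cur)]
          rw [show (c :: cur).reverse = cur.reverse ++ [c] from by simp]
          rw [pvCutBy_append, pvSeam_assoc _ (pvCutBy_ne_nil pvSepA cur.reverse)
            (pvCutBy_ne_nil pvSepA [c])]
          by_cases hsc : c = ';'
          · subst hsc
            rw [show pvCutBy pvSepA [';'] = [[], []] from by decide]
            rw [show pvSeam [[], []] (pvCutBy pvSepB rest)
                = [] :: pvHcons [] (pvCutBy pvSepB rest) from by
              rw [pvSeam_cons _ _ (by simp), pvSeam_singleton]]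
            rw [pvHcons_nil (pvCutBy_ne_nil pvSepB rest)]
            rw [show pvCutBy pvSepB (';' :: rest) = [] :: pvCutBy pvSepB rest from by
              simp [pvCutBy, pvSepB]]
          · have hA : pvSepA c = false := by
              simp [pvSepA]; exact fun h => (hsc h).elim
            have hBc : pvSepB c = false := by
              simp [pvIsNL] at hnl
              simp [pvSepB, hnl.1, hnl.2]; exact fun h => (hsc h).elim
            rw [show pvCutBy pvSepA [c] = [[c]] from by simp [pvCutBy, hA, pvHcons]]
            rw [pvSeam_singleton]
            rw [show pvCutBy pvSepB (c :: rest) = pvHcons [c] (pvCutBy pvSepB rest) from by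
              simp [pvCutBy, hBc]]

-- ---- B's scan computes the filtered pieces of pvCutBy pvSepB ----
theorem spAltGo_spec : ∀ (cs cur : List Char) (parts : List String),
    spAltGo cs cur parts = parts ++ (pvHcons cur (pvCutBy pvSepB cs)).filterMap pvF := by
  intro cs
  induction cs with
  | nil =>
    intro cur parts
    simp only [spAltGo, pvCutBy, pvHcons, List.append_nil, List.filterMap_cons,
      List.filterMap_nil, pvF]
    split <;> simp_all
  | cons c t ih =>
    intro cur parts
    rw [show spAltGo (c :: t) cur parts
        = if c = '\n' ∨ c = '\r' ∨ c = ';' then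
            spAltGo t [] (if PySem.Chars.strip cur ≠ [] then
              parts ++ [String.ofList (PySem.Chars.strip cur)] else parts)
          else spAltGo t (cur ++ [c]) parts from rfl]
    by_cases h : c = '\n' ∨ c = '\r' ∨ c = ';'
    · rw [if_pos h]
      have hsep : pvSepB c = true := by
        rcases h with h | h | h <;> simp [pvSepB, h]
      rw [show pvCutBy pvSepB (c :: t) = [] :: pvCutBy pvSepB t from by
        simp [pvCutBy, hsep]]
      rw [show pvHcons cur ([] :: pvCutBy pvSepB t) = cur :: pvCutBy pvSepB t from by
        simp [pvHcons]]
      rw [ih, pvHcons_nil (pvCutBy_ne_nil pvSepB t)]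
      simp only [List.filterMap_cons]
      unfold pvF
      split <;> simp_all
    · rw [if_neg h]
      have hsep : pvSepB c = false := by
        simp only [pvSepB, Bool.or_eq_false_iff, beq_eq_false_iff_ne, ne_eq]
        tauto
      rw [show pvCutBy pvSepB (c :: t) = pvHcons [c] (pvCutBy pvSepB t) from by
        simp [pvCutBy, hsep]]
      rw [ih, pvHcons_hcons]

-- ---- A's nested folds compute the filtered pieces of splitlines + pvCutBy pvSepA ----
theorem str_splitlines_eq (s : String) :
    PySem.Str.splitlines s = (PySem.Chars.splitlines s.toList).map String.ofList := by
  rw [← PySem.Str.splitlines_map_toList, List.map_map]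
  simp [Function.comp_def, String.ofList_toList]

theorem inner_fold_spec : ∀ (pieces : List (List Char)) (parts : List String),
    (pieces.map String.ofList).foldl (fun parts chunk =>
      let c := PySem.Str.strip chunk
      if c ≠ "" then parts ++ [c] else parts) parts
    = parts ++ pieces.filterMap pvF := by
  intro pieces
  induction pieces with
  | nil => intro parts; simp
  | cons p l ih =>
    intro parts
    simp only [List.map_cons, List.foldl_cons, ih, List.filterMap_cons]
    have hstrip : PySem.Str.strip (String.ofList p) = String.ofList (PySem.Chars.strip p) := by
      simp [PySem.Str.strip, String.toList_ofList]
    unfold pvF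
    by_cases hp : PySem.Chars.strip p = []
    · rw [hstrip, hp]
      simp
    · rw [hstrip, if_pos (by
        intro hcon
        exact hp (by simpa using congrArg String.toList hcon))]
      simp [hp]

theorem outer_fold_spec : ∀ (ls : List (List Char)) (acc : List String),
    ls.foldl (fun a l => a ++ (pvCutBy pvSepA l).filterMap pvF) acc
    = acc ++ (ls.flatMap (pvCutBy pvSepA)).filterMap pvF := by
  intro ls
  induction ls with
  | nil => intro acc; simp
  | cons l ls ih => intro acc; simp [ih, List.filterMap_append]

theorem a_side (s : String) (h : ∀ c ∈ s.toList, pvDomChar c = true) :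
    split_input_parts_py s
      = ((pvLines [] s.toList).flatMap (pvCutBy pvSepA)).filterMap pvF := by
  unfold split_input_parts_py
  rw [str_splitlines_eq, List.foldl_map]
  have hline : ∀ (line : List Char) (parts : List String),
      ((PySem.Str.split? (String.ofList line) ";").getD []).foldl (fun parts chunk =>
        let c := PySem.Str.strip chunk
        if c ≠ "" then parts ++ [c] else parts) parts
      = parts ++ (pvCutBy pvSepA line).filterMap pvF := by
    intro line parts
    rw [show PySem.Str.split? (String.ofList line) ";"
        = some ((pvCutBy pvSepA line).map String.ofList) from by
      simp [PySem.Str.split?, PySem.Chars.split?, String.toList_ofList,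
        show (";" : String).toList = [';'] from rfl, splitOn_eq_cutBy]]
    simp only [Option.getD_some]
    exact inner_fold_spec (pvCutBy pvSepA line) parts
  calc (PySem.Chars.splitlines s.toList).foldl (fun parts line =>
          ((PySem.Str.split? (String.ofList line) ";").getD []).foldl (fun parts chunk =>
            let c := PySem.Str.strip chunk
            if c ≠ "" then parts ++ [c] else parts) parts) []
      = (PySem.Chars.splitlines s.toList).foldl
          (fun a l => a ++ (pvCutBy pvSepA l).filterMap pvF) [] := by
        apply PySem.List.foldl_congr_mem
        intro a l _
        exact hline l a
    _ = ((pvLines [] s.toList).flatMap (pvCutBy pvSepA)).filterMap pvF := by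
        rw [splitlines_eq_pvLines s.toList h, outer_fold_spec]
        simp

-- ===== VERDICT (by name: the statement is the Claim_ definition above) =====
theorem split_input_parts_py_spec : Claim_equal_split_input_parts_py := by
  intro s hdom
  unfold Spec_split_input_parts_py
  have hchars : ∀ c ∈ s.toList, pvDomChar c = true := by
    have := hdom
    unfold Dom_split_input_parts_py pvDomStr at this
    simpa [List.all_eq_true] using this
  rw [a_side s hchars, pvKey s.toList.length s.toList le_rfl []]
  rw [show (([] : List Char)).reverse = [] from rfl,
    show pvCutBy pvSepA [] = [[]] from rfl, pvSeam_singleton,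
    pvHcons_nil (pvCutBy_ne_nil pvSepB s.toList)]
  unfold split_input_parts_py_alt
  rw [spAltGo_spec, pvHcons_nil (pvCutBy_ne_nil pvSepB s.toList)]
  simp
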